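-- pv_equiv track=rewrite | github.com/ROUGIER-Eric/Merkell-Hellman | merckle_hellman.py | codage_lettre
-- ===== SOURCE A (Python) =====
-- def binaire(entier):
-- 	liste_bits =[]
-- 	if entier < 256:
-- 		while entier != 0 :
-- 			liste_bits.append(entier%2)
-- 			entier = entier//2
-- 		longueur_liste = len(liste_bits)
-- 		if longueur_liste <= 8:
-- 			for loop in range(8-longueur_liste):
-- 				liste_bits.append(0)
-- 		liste_bits.reverse()
-- 	return liste_bits
--
-- def codage_lettre(cle_pu, lettre):
-- 	w = binaire(ord(lettre))
-- 	c = 0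
-- 	i = 0
-- 	for b in cle_pu:
-- 		c = c + w[i]*b
-- 		i = i +1
-- 	return c
-- ===== SOURCE B (Python) =====
-- def codage_lettre(cle_pu, lettre):
--     # Dot product of the key with the bits of ord(lettre), extracted by shifting,
--     # without building the intermediate bit list.
--     n = ord(lettre)
--     c = 0
--     for i, b in enumerate(cle_pu):
--         c += ((n >> (7 - i)) & 1) * b
--     return c
-- ===== Notes on version B (the rewrite author's own statement) =====
-- stated objective: simpler
-- what changed: B extracts each bit of ord(lettre) by shifting and masking inside a single enumerate pass over the key, eliminating binaire's while-divide loop, zero padding and list reversal entirely.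
import Mathlib
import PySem

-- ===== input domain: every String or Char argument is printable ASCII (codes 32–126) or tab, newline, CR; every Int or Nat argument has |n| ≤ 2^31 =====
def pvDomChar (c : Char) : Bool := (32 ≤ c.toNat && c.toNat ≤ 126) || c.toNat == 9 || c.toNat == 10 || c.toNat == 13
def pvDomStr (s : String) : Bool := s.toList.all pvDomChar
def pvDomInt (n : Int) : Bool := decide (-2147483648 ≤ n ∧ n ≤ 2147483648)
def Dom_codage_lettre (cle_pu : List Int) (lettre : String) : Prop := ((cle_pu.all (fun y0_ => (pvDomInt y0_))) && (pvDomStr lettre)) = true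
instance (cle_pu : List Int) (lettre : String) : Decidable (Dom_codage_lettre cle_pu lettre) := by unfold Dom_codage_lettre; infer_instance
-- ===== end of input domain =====

-- B computes the key/bit dot product by shift-and-mask in one pass, with no intermediate bit list (simpler).


-- ===== PORT A =====
-- ord(s): exact for one-character strings (Pre_ requires lettre to have length 1; Python raises TypeError otherwise)
def pyOrd (s : String) : Nat := (s.toList.head?.map Char.toNat).getD 0

-- the 'while entier != 0' loop of binaire; entier = ord(lettre) ≥ 0, so the loop is ported over Nat (exact there)
def binaireLoopF : Nat → Nat → List Int
  | 0, _ => []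
  | fuel + 1, n => if n = 0 then [] else ((n % 2 : Nat) : Int) :: binaireLoopF fuel (n / 2)

def binaireLoop (n : Nat) : List Int := binaireLoopF n n  -- fuel n suffices: n halves to 0 within n steps

def binaire (entier : Int) : List Int :=
  if entier < 256 then
    let l := binaireLoop entier.toNat
    let l := if l.length ≤ 8 then l ++ List.replicate (8 - l.length) 0 else l
    l.reverse
  else []

-- w[i] raises IndexError when out of range: Pre_ excludes that, so pyGetD's default is never used
def codage_lettre (cle_pu : List Int) (lettre : String) : Int :=
  let w := binaire ((pyOrd lettre : Nat) : Int)
  (cle_pu.foldl (fun (p : Int × Int) b => (p.1 + (PySem.List.pyGetD w p.2 0) * b, p.2 + 1)) (0, 0)).1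

-- ===== PORT B =====
-- n = ord(lettre) ≥ 0, carried as Nat; (7 - i).toNat mirrors Python's 7 - i, which is ≥ 0 under Pre_ (len ≤ 8)
def codage_lettre_alt (cle_pu : List Int) (lettre : String) : Int :=
  let n : Nat := pyOrd lettre
  (PySem.List.enumerate cle_pu 0).foldl
    (fun c p => c + (((n >>> (7 - p.1).toNat) &&& 1 : Nat) : Int) * p.2) 0

-- ===== PRECONDITION & SPEC =====
-- Pre_ excludes only inputs where A raises: lettre not a single character (ord → TypeError)
-- and keys longer than 8 (w[i] → IndexError, since w always has 8 bits for ASCII input).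
def Pre_codage_lettre (cle_pu : List Int) (lettre : String) : Prop :=
  lettre.toList.length = 1 ∧ cle_pu.length ≤ 8
instance (cle_pu : List Int) (lettre : String) : Decidable (Pre_codage_lettre cle_pu lettre) := by unfold Pre_codage_lettre; infer_instance

def pvWitness_codage_lettre : List Int × String := ([3, 5, 11], "A")

def Spec_codage_lettre (cle_pu : List Int) (lettre : String) (out : Int) : Prop := out = codage_lettre_alt cle_pu lettre
instance (cle_pu : List Int) (lettre : String) (out : Int) : Decidable (Spec_codage_lettre cle_pu lettre out) := by unfold Spec_codage_lettre; infer_instance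

-- ===== CLAIM (what is proved, stated in full; the proofs are below) =====
def Claim_equal_codage_lettre : Prop := ∀ (cle_pu : List Int) (lettre : String), Dom_codage_lettre cle_pu lettre → Pre_codage_lettre cle_pu lettre → Spec_codage_lettre cle_pu lettre (codage_lettre cle_pu lettre)

-- ===== LEMMAS AND PROOFS =====

-- A's bit list, characterised: for m < 256 it is the 8 bits of m, big-endian, each a shift-and-mask
set_option maxRecDepth 4000 in
theorem binaire_eq_bits : ∀ m : Nat, m < 256 →
    binaire (m : Int) = (List.range 8).map (fun i => (((m >>> (7 - i)) &&& 1 : Nat) : Int)) := by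
  decide

theorem fold_eq (n : Nat) (hn : n < 256) :
    ∀ (l : List Int) (j : Nat) (c : Int), j + l.length ≤ 8 →
      (l.foldl (fun (p : Int × Int) b => (p.1 + (PySem.List.pyGetD (binaire (n : Int)) p.2 0) * b, p.2 + 1)) (c, (j : Int))).1
      = (PySem.List.enumerate l (j : Int)).foldl
          (fun c p => c + (((n >>> (7 - p.1).toNat) &&& 1 : Nat) : Int) * p.2) c := by
  intro l
  induction l with
  | nil => intro j c _; simp [PySem.List.enumerate]
  | cons b t ih =>
    intro j c hlen
    have hj : j < 8 := by simp at hlen; omega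
    rw [List.foldl_cons, PySem.List.enumerate_cons, List.foldl_cons]
    have hw : PySem.List.pyGetD (binaire (n : Int)) (j : Int) 0
        = (((n >>> (7 - j)) &&& 1 : Nat) : Int) := by
      rw [binaire_eq_bits n hn, PySem.List.pyGetD_natCast]
      rw [List.getD_eq_getElem?_getD]
      simp [hj]
    have hsh : ((7 : Int) - (j : Int)).toNat = 7 - j := by omega
    rw [hw, hsh]
    have : ((j : Int) + 1) = (((j + 1 : Nat)) : Int) := by push_cast; ring
    rw [this, ih (j + 1) (c + ((((n >>> (7 - j)) &&& 1 : Nat) : Int)) * b) (by simp at hlen ⊢; omega)]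

-- ===== VERDICT (by name: the statement is the Claim_ definition above) =====
theorem codage_lettre_spec : Claim_equal_codage_lettre := by
  intro cle_pu lettre hdom hpre
  unfold Spec_codage_lettre codage_lettre codage_lettre_alt
  obtain ⟨h1, h2⟩ := hpre
  obtain ⟨ch, hch⟩ : ∃ ch, lettre.toList = [ch] := by
    cases h : lettre.toList with
    | nil => simp [h] at h1
    | cons a t => cases t with
      | nil => exact ⟨a, rfl⟩
      | cons x y => simp [h] at h1
  have hdomc : pvDomChar ch = true := by
    unfold Dom_codage_lettre at hdom
    simp [pvDomStr, hch] at hdom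
    exact hdom.2
  have hn : pyOrd lettre < 256 := by
    unfold pyOrd
    rw [hch]
    simp [pvDomChar] at hdomc ⊢
    omega
  have := fold_eq (pyOrd lettre) hn cle_pu 0 0 (by omega)
  simpa using this
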